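-- pv_equiv track=rewrite | github.com/kingsteve2006/AI-Powered-Resume-Builder-ATS-Optimization-Agent | resume_builder_app.py | fallback_skills_enhancement
-- ===== SOURCE A (Python) =====
-- def fallback_skills_enhancement(skills: str) -> str:
--     """Fallback skills enhancement"""
--     skill_enhancements = {
--         "javascript": "JavaScript (ES6+, TypeScript, Node.js, React, Vue.js)",
--         "python": "Python (Django, Flask, FastAPI, Data Science, Machine Learning)",
--         "java": "Java (Spring Boot, Microservices, Enterprise Applications)",
--         "react": "React (Hooks, Context API, Redux, Next.js, Testing Library)",
--         "html": "HTML5, CSS3, Responsive Design, Bootstrap, Tailwind CSS",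
--         "aws": "AWS (EC2, S3, Lambda, RDS, CloudFormation)",
--         "docker": "Docker, Kubernetes, Container Orchestration"
--     }
--
--     enhanced = skills
--     for key, value in skill_enhancements.items():
--         if key.lower() in skills.lower():
--             enhanced = enhanced.replace(key, value)
--
--     return enhanced
-- ===== SOURCE B (Python) =====
-- def fallback_skills_enhancement(skills: str) -> str:
--     """Fallback skills enhancement: split on each key and rejoin with its
--     enhanced description (no membership pre-scan; it is a no-op)."""
--     enhancements = [
--         ("javascript", "JavaScript (ES6+, TypeScript, Node.js, React, Vue.js)"),
--         ("python", "Python (Django, Flask, FastAPI, Data Science, Machine Learning)"),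
--         ("java", "Java (Spring Boot, Microservices, Enterprise Applications)"),
--         ("react", "React (Hooks, Context API, Redux, Next.js, Testing Library)"),
--         ("html", "HTML5, CSS3, Responsive Design, Bootstrap, Tailwind CSS"),
--         ("aws", "AWS (EC2, S3, Lambda, RDS, CloudFormation)"),
--         ("docker", "Docker, Kubernetes, Container Orchestration"),
--     ]
--
--     def apply_all(text: str, pairs) -> str:
--         if not pairs:
--             return text
--         key, value = pairs[0]
--         return apply_all(value.join(text.split(key)), pairs[1:])
--
--     return apply_all(skills, enhancements)
-- ===== Notes on version B (the rewrite author's own statement) =====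
-- stated objective: alternative
-- what changed: B drops the per-key case-insensitive membership pre-scan (proved a no-op: a key the gate rejects can never occur in the partially-enhanced text) and performs each substitution by splitting the text on the key and rejoining the pieces with the enhanced description in a recursion over the pair list, instead of A's gated in-place str.replace loop; the sequential key order is kept because a combined one-pass substitution would change results (e.g. on 'dockereact').
import Mathlib
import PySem

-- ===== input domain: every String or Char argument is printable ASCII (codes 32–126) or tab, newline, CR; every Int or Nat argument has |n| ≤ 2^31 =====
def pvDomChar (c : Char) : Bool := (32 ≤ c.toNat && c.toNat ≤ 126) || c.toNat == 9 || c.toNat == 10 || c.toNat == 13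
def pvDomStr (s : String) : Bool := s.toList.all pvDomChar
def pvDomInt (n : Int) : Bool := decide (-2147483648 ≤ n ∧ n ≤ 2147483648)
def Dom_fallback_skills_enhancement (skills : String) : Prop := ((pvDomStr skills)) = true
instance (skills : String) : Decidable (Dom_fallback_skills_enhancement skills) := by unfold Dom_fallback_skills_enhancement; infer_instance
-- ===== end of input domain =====

-- B applies the same sequential key→description substitutions but drops the per-key case-insensitive
-- membership pre-scan (proved a no-op) and realizes each substitution as split-on-key / rejoin-with-value
-- recursion instead of a gated in-place replace loop (objective: alternative, same cost).

-- ===== PORT A =====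
-- the dict literal `skill_enhancements` (insertion order)
def pvSkillEnhancementsA : List (String × String) :=
  [("javascript", "JavaScript (ES6+, TypeScript, Node.js, React, Vue.js)"),
   ("python", "Python (Django, Flask, FastAPI, Data Science, Machine Learning)"),
   ("java", "Java (Spring Boot, Microservices, Enterprise Applications)"),
   ("react", "React (Hooks, Context API, Redux, Next.js, Testing Library)"),
   ("html", "HTML5, CSS3, Responsive Design, Bootstrap, Tailwind CSS"),
   ("aws", "AWS (EC2, S3, Lambda, RDS, CloudFormation)"),
   ("docker", "Docker, Kubernetes, Container Orchestration")]

-- `for key, value in skill_enhancements.items(): if key.lower() in skills.lower(): enhanced = enhanced.replace(key, value)`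
def fallback_skills_enhancement (skills : String) : String :=
  pvSkillEnhancementsA.foldl
    (fun enhanced kv =>
      if PySem.Str.isIn (PySem.Str.lower kv.1) (PySem.Str.lower skills) then
        PySem.Str.replace enhanced kv.1 kv.2
      else enhanced)
    skills

-- ===== PORT B =====
-- the `enhancements` pair list of Source B, held as char lists (strings are ported on the List Char side)
def pvEnhancementsB : List (List Char × List Char) :=
  [("javascript".toList, "JavaScript (ES6+, TypeScript, Node.js, React, Vue.js)".toList),
   ("python".toList, "Python (Django, Flask, FastAPI, Data Science, Machine Learning)".toList),
   ("java".toList, "Java (Spring Boot, Microservices, Enterprise Applications)".toList),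
   ("react".toList, "React (Hooks, Context API, Redux, Next.js, Testing Library)".toList),
   ("html".toList, "HTML5, CSS3, Responsive Design, Bootstrap, Tailwind CSS".toList),
   ("aws".toList, "AWS (EC2, S3, Lambda, RDS, CloudFormation)".toList),
   ("docker".toList, "Docker, Kubernetes, Container Orchestration".toList)]

-- `def apply_all(text, pairs): ... return apply_all(value.join(text.split(key)), pairs[1:])`
-- (text.split(key) with the nonempty literal key is PySem.Chars.splitOn; value.join is PySem.Chars.join)
def pvApplyAll : List Char → List (List Char × List Char) → List Char
  | text, [] => text
  | text, kv :: rest => pvApplyAll (PySem.Chars.join kv.2 (PySem.Chars.splitOn text kv.1)) rest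

def fallback_skills_enhancement_alt (skills : String) : String :=
  String.ofList (pvApplyAll skills.toList pvEnhancementsB)

-- ===== PRECONDITION & SPEC =====
def Spec_fallback_skills_enhancement (skills : String) (out : String) : Prop := out = fallback_skills_enhancement_alt skills
instance (skills : String) (out : String) : Decidable (Spec_fallback_skills_enhancement skills out) := by unfold Spec_fallback_skills_enhancement; infer_instance

-- ===== CLAIM (what is proved, stated in full; the proofs are below) =====
def Claim_equal_fallback_skills_enhancement : Prop := ∀ (skills : String), Dom_fallback_skills_enhancement skills → Spec_fallback_skills_enhancement skills (fallback_skills_enhancement skills)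

-- ===== LEMMAS AND PROOFS =====

-- common midpoint: one left-to-right substitution of `k` by `v`, written as plain structural recursion
def pvRepl (k v : List Char) : List Char → List Char
  | [] => []
  | c :: t =>
    if k.isPrefixOf (c :: t) then v ++ pvRepl k v (t.drop (k.length - 1))
    else c :: pvRepl k v t
  termination_by l => l.length
  decreasing_by
  · simp only [List.length_cons, List.length_drop]; omega
  · simp

-- the splitter of PySem.Chars.splitOn, written fuel-free
def pvSp (k : List Char) : List Char → List Char → List (List Char)
  | cur, [] => [cur.reverse]
  | cur, c :: t =>
    if k.isPrefixOf (c :: t) then cur.reverse :: pvSp k [] (t.drop (k.length - 1))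
    else pvSp k (c :: cur) t
  termination_by _ l => l.length
  decreasing_by
  · simp only [List.length_cons, List.length_drop]; omega
  · simp

theorem pvDropKey (k : List Char) (hk : k ≠ []) (c : Char) (t : List Char) :
    List.drop k.length (c :: t) = t.drop (k.length - 1) := by
  cases k with
  | nil => exact absurd rfl hk
  | cons k0 ks => simp

theorem pvReplaceGoEq (k v : List Char) (hk : k ≠ []) :
    ∀ (fuel : Nat) (l acc : List Char), l.length ≤ fuel →
      PySem.Chars.replace.go k v fuel l acc = acc.reverse ++ pvRepl k v l := by
  intro fuel
  induction fuel with
  | zero =>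
    intro l acc h
    have hl : l = [] := List.length_eq_zero_iff.mp (Nat.le_zero.mp h)
    subst hl; simp [PySem.Chars.replace.go, pvRepl]
  | succ n ih =>
    intro l acc h
    cases l with
    | nil => simp [PySem.Chars.replace.go, pvRepl]
    | cons c t =>
      by_cases hp : k.isPrefixOf (c :: t)
      · have hstep : PySem.Chars.replace.go k v (n+1) (c :: t) acc
            = PySem.Chars.replace.go k v n (List.drop k.length (c :: t)) (v.reverse ++ acc) := by
          simp [PySem.Chars.replace.go, hp]
        have hlen : (List.drop k.length (c :: t)).length ≤ n := by
          have h1 : 1 ≤ k.length := by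
            cases k with
            | nil => exact absurd rfl hk
            | cons a b => simp
          simp only [List.length_drop, List.length_cons]
          simp only [List.length_cons] at h; omega
        rw [hstep, ih _ _ hlen, pvDropKey k hk]
        simp [pvRepl, hp, List.append_assoc]
      · have hstep : PySem.Chars.replace.go k v (n+1) (c :: t) acc
            = PySem.Chars.replace.go k v n t (c :: acc) := by
          simp [PySem.Chars.replace.go, hp]
        have hlen : t.length ≤ n := by simp only [List.length_cons] at h; omega
        rw [hstep, ih _ _ hlen]
        simp [pvRepl, hp]

theorem pvCharsReplaceEq (k v l : List Char) (hk : k ≠ []) :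
    PySem.Chars.replace l k v = pvRepl k v l := by
  have : k.isEmpty = false := by simp [hk]
  simp [PySem.Chars.replace, this, pvReplaceGoEq k v hk l.length l [] (le_refl _)]

theorem pvSplitOnGoEq (k : List Char) (hk : k ≠ []) :
    ∀ (fuel : Nat) (l cur : List Char) (acc : List (List Char)), l.length ≤ fuel →
      PySem.Chars.splitOn.go k fuel l cur acc = acc.reverse ++ pvSp k cur l := by
  intro fuel
  induction fuel with
  | zero =>
    intro l cur acc h
    have hl : l = [] := List.length_eq_zero_iff.mp (Nat.le_zero.mp h)
    subst hl; simp [PySem.Chars.splitOn.go, pvSp]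
  | succ n ih =>
    intro l cur acc h
    cases l with
    | nil => simp [PySem.Chars.splitOn.go, pvSp]
    | cons c t =>
      by_cases hp : k.isPrefixOf (c :: t)
      · have hstep : PySem.Chars.splitOn.go k (n+1) (c :: t) cur acc
            = PySem.Chars.splitOn.go k n (List.drop k.length (c :: t)) [] (cur.reverse :: acc) := by
          simp [PySem.Chars.splitOn.go, hp]
        have hlen : (List.drop k.length (c :: t)).length ≤ n := by
          have h1 : 1 ≤ k.length := by
            cases k with
            | nil => exact absurd rfl hk
            | cons a b => simp
          simp only [List.length_drop, List.length_cons]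
          simp only [List.length_cons] at h; omega
        rw [hstep, ih _ _ _ hlen, pvDropKey k hk]
        simp [pvSp, hp]
      · have hstep : PySem.Chars.splitOn.go k (n+1) (c :: t) cur acc
            = PySem.Chars.splitOn.go k n t (c :: cur) acc := by
          simp [PySem.Chars.splitOn.go, hp]
        have hlen : t.length ≤ n := by simp only [List.length_cons] at h; omega
        rw [hstep, ih _ _ _ hlen]
        simp [pvSp, hp]

theorem pvSpNeNil (k : List Char) : ∀ (cur l : List Char), pvSp k cur l ≠ [] := by
  intro cur l
  fun_induction pvSp k cur l with
  | case1 cur => simp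
  | case2 cur c t hp ih => simp
  | case3 cur c t hp ih => exact ih

theorem pvJoinSp (k v : List Char) : ∀ (l cur : List Char),
    PySem.Chars.join v (pvSp k cur l) = cur.reverse ++ pvRepl k v l := by
  intro l
  have h : ∀ cur, PySem.Chars.join v (pvSp k cur l) = cur.reverse ++ pvRepl k v l := by
    intro cur
    fun_induction pvSp k cur l with
    | case1 cur => simp [PySem.Chars.join_singleton, pvRepl]
    | case2 cur c t hp ih =>
      obtain ⟨h0, tl0, he⟩ : ∃ h0 tl0, pvSp k [] (t.drop (k.length - 1)) = h0 :: tl0 := by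
        cases hsp : pvSp k [] (t.drop (k.length - 1)) with
        | nil => exact absurd hsp (pvSpNeNil k _ _)
        | cons h0 tl0 => exact ⟨h0, tl0, rfl⟩
      rw [he] at ih ⊢
      rw [PySem.Chars.join_cons_cons, ih]
      simp [pvRepl, hp, List.append_assoc]
    | case3 cur c t hp ih =>
      rw [ih]
      simp [pvRepl, hp, List.append_assoc]
  exact h
theorem pvJoinSplitOnEq (k v l : List Char) (hk : k ≠ []) :
    PySem.Chars.join v (PySem.Chars.splitOn l k) = pvRepl k v l := by
  have : PySem.Chars.splitOn l k = pvSp k [] l := by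
    simpa using pvSplitOnGoEq k hk (l.length + 1) l [] [] (by omega)
  rw [this]
  simpa using pvJoinSp k v l []

-- an occurrence of p inside the untouched part of pvRepl's output comes from the input
theorem pvReplPrefixOrig (k v p : List Char) (hv : v ≠ []) (hhead : v.head hv ∉ p) :
    ∀ (l q : List Char), q <:+ p → q ≠ [] → q <+: pvRepl k v l → q <+: l := by
  intro l
  fun_induction pvRepl k v l with
  | case1 =>
    intro q hq hqne hpre
    simp only [List.prefix_nil] at hpre
    exact absurd hpre hqne
  | case2 c t hp ih =>
    intro q hq hqne hpre
    cases v with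
    | nil => exact absurd rfl hv
    | cons v0 vt =>
      cases q with
      | nil => exact absurd rfl hqne
      | cons q0 qt =>
        rw [List.cons_append, List.cons_prefix_cons] at hpre
        obtain ⟨hq0, -⟩ := hpre
        subst hq0
        exact absurd (hq.subset List.mem_cons_self) (by simpa using hhead)
  | case3 c t hp ih =>
    intro q hq hqne hpre
    cases q with
    | nil => exact absurd rfl hqne
    | cons q0 qt =>
      rw [List.cons_prefix_cons] at hpre
      obtain ⟨rfl, hqt⟩ := hpre
      by_cases hqt' : qt = []
      · subst hqt'; simp [List.cons_prefix_cons]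
      · have hqt_suffix : qt <:+ p := (List.suffix_cons q0 qt).trans hq
        have h2 := ih qt hqt_suffix hqt' hqt
        exact List.cons_prefix_cons.mpr ⟨rfl, h2⟩

-- no occurrence of p in l and none in v (with v's edge chars outside p) ⇒ none in pvRepl's output
theorem pvReplNoOcc (k v p : List Char) (hv : v ≠ []) (hhead : v.head hv ∉ p)
    (hlast : v.getLast hv ∉ p) (hpv : ∀ j, ¬ p <+: v.drop j) :
    ∀ (l : List Char), (∀ j, ¬ p <+: l.drop j) → ∀ j, ¬ p <+: (pvRepl k v l).drop j := by
  intro l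
  fun_induction pvRepl k v l with
  | case1 =>
    intro hocc j hpre
    simp only [List.drop_nil, List.prefix_nil] at hpre
    exact hocc 0 (by simp [hpre])
  | case2 c t hp ih =>
    intro hocc j hpre
    have hocc' : ∀ j, ¬ p <+: ((c :: t).drop 1 |>.drop (k.length - 1)).drop j := by
      intro j0 hj0
      rw [List.drop_drop, List.drop_drop] at hj0
      exact hocc _ hj0
    have hocc'' : ∀ j, ¬ p <+: (t.drop (k.length - 1)).drop j := by
      simpa using hocc'
    rcases Nat.lt_or_ge j v.length with hlt | hle
    · rw [List.drop_append_of_le_length (Nat.le_of_lt hlt)] at hpre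
      have hx : v.drop j ≠ [] := by
        intro hnil
        have := List.length_eq_zero_iff.mpr hnil
        simp only [List.length_drop] at this; omega
      rcases Nat.lt_or_ge (v.drop j).length p.length with hpl | hpl
      · have hxp : v.drop j <+: p :=
          List.prefix_of_prefix_length_le (List.prefix_append _ _) hpre (Nat.le_of_lt hpl)
        have hmem : (v.drop j).getLast hx ∈ p := hxp.subset (List.getLast_mem hx)
        rw [List.getLast_drop hx] at hmem
        exact hlast hmem
      · exact hpv j (List.prefix_of_prefix_length_le hpre (List.prefix_append _ _) hpl)
    · rw [List.drop_append, List.drop_eq_nil_of_le hle, List.nil_append] at hpre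
      exact ih hocc'' _ hpre
  | case3 c t hp ih =>
    intro hocc j hpre
    have hocc_t : ∀ j, ¬ p <+: t.drop j := by
      intro j0 hj0
      exact hocc (j0 + 1) (by simpa using hj0)
    cases j with
    | succ n =>
      simp only [List.drop_succ_cons] at hpre
      exact ih hocc_t n hpre
    | zero =>
      simp only [List.drop_zero] at hpre
      cases p with
      | nil => exact hocc 0 (by simp)
      | cons p0 pt =>
        rw [List.cons_prefix_cons] at hpre
        obtain ⟨rfl, hpt⟩ := hpre
        cases hpt0 : pt with
        | nil =>
          exact hocc 0 (by simp [hpt0, List.cons_prefix_cons])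
        | cons a b =>
          have hsuf : pt <:+ p0 :: pt := List.suffix_cons p0 pt
          have := pvReplPrefixOrig k v (p0 :: pt) hv hhead t pt hsuf (by simp [hpt0]) hpt
          exact hocc 0 (by simp [List.cons_prefix_cons, this])

theorem pvReplId (k v : List Char) : ∀ l, (∀ j, ¬ k <+: l.drop j) → pvRepl k v l = l := by
  intro l
  fun_induction pvRepl k v l with
  | case1 => intro _; rfl
  | case2 c t hp ih =>
    intro hocc
    exact absurd (by simpa using List.isPrefixOf_iff_prefix.mp hp) (hocc 0)
  | case3 c t hp ih =>
    intro hocc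
    have : ∀ j, ¬ k <+: t.drop j := fun j hj => hocc (j + 1) (by simpa using hj)
    rw [ih this]

-- A's loop at the char level
def pvGateFold (s0 : List Char) : List Char → List (List Char × List Char) → List Char
  | t, [] => t
  | t, kv :: rest =>
    pvGateFold s0
      (if PySem.Chars.isIn (PySem.Chars.lower kv.1) (PySem.Chars.lower s0) then
        PySem.Chars.replace t kv.1 kv.2
      else t) rest

theorem pvStrFoldEq (s0 : String) :
    ∀ (tbl : List (String × String)) (t : String),
      (tbl.foldl
        (fun enhanced kv =>
          if PySem.Str.isIn (PySem.Str.lower kv.1) (PySem.Str.lower s0) then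
            PySem.Str.replace enhanced kv.1 kv.2
          else enhanced) t).toList
      = pvGateFold s0.toList t.toList (tbl.map (fun kv => (kv.1.toList, kv.2.toList))) := by
  intro tbl
  induction tbl with
  | nil => intro t; simp [pvGateFold]
  | cons kv rest ih =>
    intro t
    simp only [List.foldl_cons, List.map_cons, pvGateFold]
    by_cases h : PySem.Chars.isIn (PySem.Chars.lower kv.1.toList) (PySem.Chars.lower s0.toList) = true
    · rw [ih]
      simp [PySem.Str.isIn, h]
    · rw [ih]
      simp only [Bool.not_eq_true] at h
      simp [PySem.Str.isIn, h]

-- what makes the table safe: keys nonempty and lowercase; each later key absent from each earlier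
-- value, whose first and last characters moreover never occur in a key
def pvRel (a b : List Char × List Char) : Prop :=
  a.2 ≠ [] ∧ PySem.Chars.isIn b.1 a.2 = false ∧
  ∀ ch ∈ b.1, a.2.head? ≠ some ch ∧ a.2.reverse.head? ≠ some ch

def pvGoodTable (tbl : List (List Char × List Char)) : Prop :=
  (∀ kv ∈ tbl, kv.1 ≠ [] ∧ PySem.Chars.lower kv.1 = kv.1) ∧ List.Pairwise pvRel tbl

-- executable form of pvGoodTable (kernel-friendly: plain Bool evaluation)
def pvRelBool (a b : List Char × List Char) : Bool :=
  !a.2.isEmpty && !PySem.Chars.isIn b.1 a.2 &&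
    b.1.all (fun ch => a.2.head? != some ch && a.2.reverse.head? != some ch)

def pvPairwiseBool : List (List Char × List Char) → Bool
  | [] => true
  | a :: rest => rest.all (fun b => pvRelBool a b) && pvPairwiseBool rest

def pvGoodBool (tbl : List (List Char × List Char)) : Bool :=
  tbl.all (fun kv => !kv.1.isEmpty && (PySem.Chars.lower kv.1 == kv.1)) && pvPairwiseBool tbl

theorem pvRelOfBool (a b : List Char × List Char) (h : pvRelBool a b = true) : pvRel a b := by
  unfold pvRelBool at h
  rw [Bool.and_eq_true, Bool.and_eq_true] at h
  obtain ⟨⟨h1, h2⟩, h3⟩ := h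
  refine ⟨by simpa using h1, by simpa using h2, ?_⟩
  intro ch hch
  have := List.all_eq_true.mp h3 ch hch
  rw [Bool.and_eq_true] at this
  exact ⟨by simpa using this.1, by simpa using this.2⟩

theorem pvPairwiseOfBool : ∀ tbl, pvPairwiseBool tbl = true → List.Pairwise pvRel tbl := by
  intro tbl
  induction tbl with
  | nil => intro _; exact List.Pairwise.nil
  | cons a rest ih =>
    intro h
    unfold pvPairwiseBool at h
    rw [Bool.and_eq_true] at h
    exact List.pairwise_cons.mpr
      ⟨fun b hb => pvRelOfBool a b (List.all_eq_true.mp h.1 b hb), ih h.2⟩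

theorem pvGoodOfBool (tbl : List (List Char × List Char)) (h : pvGoodBool tbl = true) :
    pvGoodTable tbl := by
  unfold pvGoodBool at h
  rw [Bool.and_eq_true] at h
  refine ⟨?_, pvPairwiseOfBool tbl h.2⟩
  intro kv hm
  have := List.all_eq_true.mp h.1 kv hm
  rw [Bool.and_eq_true] at this
  exact ⟨by simpa using this.1, by simpa using this.2⟩

theorem pvNotOccOfIsInFalse {p t : List Char} (h : PySem.Chars.isIn p t = false) :
    ∀ j, ¬ p <+: t.drop j := by
  intro j hj
  have := (PySem.Chars.exists_prefix_drop_iff_isIn p t).mp ⟨j, hj⟩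
  rw [this] at h; exact Bool.true_eq_false.mp h

theorem pvIsInFalseOfNotOcc {p t : List Char} (h : ∀ j, ¬ p <+: t.drop j) :
    PySem.Chars.isIn p t = false := by
  cases e : PySem.Chars.isIn p t
  · rfl
  · obtain ⟨j, hj⟩ := (PySem.Chars.exists_prefix_drop_iff_isIn p t).mpr e
    exact absurd hj (h j)

theorem pvLoopEq (s0 : List Char) :
    ∀ (tbl : List (List Char × List Char)) (t : List Char),
      pvGoodTable tbl →
      (∀ kv ∈ tbl, PySem.Chars.isIn (PySem.Chars.lower kv.1) (PySem.Chars.lower s0) = false →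
        PySem.Chars.isIn kv.1 t = false) →
      pvGateFold s0 t tbl = pvApplyAll t tbl := by
  intro tbl
  induction tbl with
  | nil => intro t _ _; rfl
  | cons kv rest ih =>
    intro t hGood hinv
    obtain ⟨hkeys, hpw⟩ := hGood
    have hk : kv.1 ≠ [] := (hkeys kv List.mem_cons_self).1
    obtain ⟨hrel, hpw'⟩ := List.pairwise_cons.mp hpw
    have hA : (if PySem.Chars.isIn (PySem.Chars.lower kv.1) (PySem.Chars.lower s0) then
          PySem.Chars.replace t kv.1 kv.2 else t) = pvRepl kv.1 kv.2 t := by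
      by_cases hg : PySem.Chars.isIn (PySem.Chars.lower kv.1) (PySem.Chars.lower s0) = true
      · simp [hg, pvCharsReplaceEq _ _ _ hk]
      · simp only [Bool.not_eq_true] at hg
        have hnin : PySem.Chars.isIn kv.1 t = false := hinv kv List.mem_cons_self hg
        simp [hg, pvReplId kv.1 kv.2 t (pvNotOccOfIsInFalse hnin)]
    have hinv' : ∀ kv' ∈ rest,
        PySem.Chars.isIn (PySem.Chars.lower kv'.1) (PySem.Chars.lower s0) = false →
        PySem.Chars.isIn kv'.1 (pvRepl kv.1 kv.2 t) = false := by
      intro kv' hmem hg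
      have hold := hinv kv' (List.mem_cons_of_mem _ hmem) hg
      obtain ⟨hv, hpvIn, hch⟩ := hrel kv' hmem
      have hhead : kv.2.head hv ∉ kv'.1 := by
        intro hm
        exact (hch _ hm).1 (List.head?_eq_some_head hv)
      have hlast : kv.2.getLast hv ∉ kv'.1 := by
        intro hm
        exact (hch _ hm).2
          (by rw [List.head?_reverse]; exact List.getLast?_eq_some_getLast hv)
      exact pvIsInFalseOfNotOcc
        (pvReplNoOcc kv.1 kv.2 kv'.1 hv hhead hlast (pvNotOccOfIsInFalse hpvIn) t
          (pvNotOccOfIsInFalse hold))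
    show pvGateFold s0 t (kv :: rest) = pvApplyAll t (kv :: rest)
    simp only [pvGateFold, pvApplyAll]
    rw [pvJoinSplitOnEq _ _ _ hk, hA]
    exact ih (pvRepl kv.1 kv.2 t)
      ⟨fun x hx => hkeys x (List.mem_cons_of_mem _ hx), hpw'⟩ hinv'

theorem pvInitInv (s0 p : List Char) (hlow : PySem.Chars.lower p = p)
    (hg : PySem.Chars.isIn (PySem.Chars.lower p) (PySem.Chars.lower s0) = false) :
    PySem.Chars.isIn p s0 = false := by
  rw [hlow] at hg
  cases e : PySem.Chars.isIn p s0
  · rfl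
  · have hinf : p <:+: s0 := (PySem.Chars.isIn_iff_infix p s0).mp e
    have hmap : PySem.Chars.lower p <:+: PySem.Chars.lower s0 := by
      simpa [PySem.Chars.lower] using List.IsInfix.map PySem.Chars.lowerChar hinf
    rw [hlow] at hmap
    rw [(PySem.Chars.isIn_iff_infix p (PySem.Chars.lower s0)).mpr hmap] at hg
    exact absurd hg (by simp)

theorem pvTablesAgree :
    pvSkillEnhancementsA.map (fun kv => (kv.1.toList, kv.2.toList)) = pvEnhancementsB := by
  simp [pvSkillEnhancementsA, pvEnhancementsB]

set_option maxRecDepth 8192 in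
theorem pvGoodB : pvGoodTable pvEnhancementsB :=
  pvGoodOfBool _ (by decide)

theorem pvMainEq (skills : String) :
    fallback_skills_enhancement skills = fallback_skills_enhancement_alt skills := by
  rw [← String.toList_inj]
  have h1 := pvStrFoldEq skills pvSkillEnhancementsA skills
  rw [pvTablesAgree] at h1
  have h2 : (fallback_skills_enhancement_alt skills).toList
      = pvApplyAll skills.toList pvEnhancementsB := by
    simp [fallback_skills_enhancement_alt, String.toList_ofList]
  have hinv0 : ∀ kv ∈ pvEnhancementsB,
      PySem.Chars.isIn (PySem.Chars.lower kv.1) (PySem.Chars.lower skills.toList) = false →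
      PySem.Chars.isIn kv.1 skills.toList = false := by
    intro kv hm hg
    exact pvInitInv skills.toList kv.1 ((pvGoodB.1 kv hm).2) hg
  rw [show (fallback_skills_enhancement skills).toList
      = pvGateFold skills.toList skills.toList pvEnhancementsB from h1, h2]
  exact pvLoopEq skills.toList pvEnhancementsB skills.toList pvGoodB hinv0

-- ===== VERDICT (by name: the statement is the Claim_ definition above) =====
theorem fallback_skills_enhancement_spec : Claim_equal_fallback_skills_enhancement := by
  intro skills _
  show fallback_skills_enhancement skills = fallback_skills_enhancement_alt skills
  exact pvMainEq skills
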